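-- pv_equiv track=rewrite | github.com/kh4rg0sh/json-to-graphql-schema-generator | single-item/generator.py | CapitalCase
-- ===== SOURCE A (Python) =====
-- def CapitalCase(string):
--     delimiters = [" ", "_", "-"]
--     words = [string]
--
--     for char in delimiters:
--         new_words = []
--         for word in words:
--             new_words += word.split(char)
--         words = new_words
--
--     for ind, word in enumerate(words):
--         words[ind] = word.capitalize()
--
--     return ''.join(words)
-- ===== SOURCE B (Python) =====
-- def CapitalCase(string):
--     parts = []
--     word = ""
--     for ch in string:
--         if ch == " " or ch == "_" or ch == "-":
--             parts.append(word.capitalize())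
--             word = ""
--         else:
--             word = word + ch
--     parts.append(word.capitalize())
--     return "".join(parts)
-- ===== Notes on version B (the rewrite author's own statement) =====
-- stated objective: alternative
-- what changed: Replaced A's three successive split passes (which rebuild the whole word list once per delimiter) by a single character-by-character tokenizing scan that flushes and capitalizes each word at a delimiter; same asymptotic cost, and slower in CPython where str.split is C-level.
import Mathlib
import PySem

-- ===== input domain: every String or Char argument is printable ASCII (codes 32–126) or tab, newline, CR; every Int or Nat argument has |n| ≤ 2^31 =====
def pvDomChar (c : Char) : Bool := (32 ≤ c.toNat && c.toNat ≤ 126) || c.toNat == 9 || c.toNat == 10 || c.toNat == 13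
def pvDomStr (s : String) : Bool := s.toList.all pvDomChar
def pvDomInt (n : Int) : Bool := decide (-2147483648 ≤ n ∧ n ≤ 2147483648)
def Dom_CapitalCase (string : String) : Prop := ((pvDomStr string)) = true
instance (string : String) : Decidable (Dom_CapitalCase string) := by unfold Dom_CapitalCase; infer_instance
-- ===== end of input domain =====

-- B replaces A's three successive split passes by one character-by-character tokenizing scan (alternative decomposition; same return value).

-- shared port of the builtin str.capitalize (first char uppercased, rest lowered); exact on the ASCII domain
def pyCapitalize (w : String) : String :=
  String.ofList (match w.toList with
    | [] => []
    | c :: rest => PySem.Chars.upperChar c :: PySem.Chars.lower rest)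

-- port of Python's w.split(d) for a nonempty one-character separator d (exact: PySem.Chars.splitOn is s.split(sep) for sep ≠ "")
def strSplitChar (w d : String) : List String :=
  (PySem.Chars.splitOn w.toList d.toList).map String.ofList

-- ===== PORT A =====
def CapitalCase (string : String) : String :=
  let delimiters : List String := [" ", "_", "-"]
  let words : List String := [string]
  let words := delimiters.foldl
    (fun words char => words.foldl (fun new_words word => new_words ++ strSplitChar word char) []) words
  -- 'for ind, word in enumerate(words): words[ind] = word.capitalize()' — in-place update of every slot = map
  let words := words.map pyCapitalize
  PySem.Str.join "" words

-- ===== PORT B =====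
def CapitalCase_alt (string : String) : String :=
  let st := string.toList.foldl
    (fun (s : List String × String) ch =>
      if ch == ' ' || ch == '_' || ch == '-' then
        (s.1 ++ [pyCapitalize s.2], "")
      else
        (s.1, s.2.push ch)) ([], "")
  PySem.Str.join "" (st.1 ++ [pyCapitalize st.2])

-- ===== PRECONDITION & SPEC =====
def Spec_CapitalCase (string : String) (out : String) : Prop := out = CapitalCase_alt string
instance (string : String) (out : String) : Decidable (Spec_CapitalCase string out) := by unfold Spec_CapitalCase; infer_instance

-- ===== CLAIM (what is proved, stated in full; the proofs are below) =====
def Claim_equal_CapitalCase : Prop := ∀ (string : String), Dom_CapitalCase string → Spec_CapitalCase string (CapitalCase string)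

-- ===== LEMMAS AND PROOFS =====

-- multi-delimiter tokenizer (proof-only common form of both programs' word lists)
def pvConsHead (c : Char) : List (List Char) → List (List Char)
  | [] => [[c]]
  | h :: t => (c :: h) :: t

def pvSM (p : Char → Bool) : List Char → List (List Char)
  | [] => [[]]
  | c :: cs => if p c then [] :: pvSM p cs else pvConsHead c (pvSM p cs)

def pvPrevHead (pre : List Char) : List (List Char) → List (List Char)
  | [] => [pre]
  | h :: t => (pre ++ h) :: t

theorem pvSM_ne_nil (p : Char → Bool) (l : List Char) : pvSM p l ≠ [] := by
  cases l with
  | nil => simp [pvSM]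
  | cons c cs =>
    simp only [pvSM]
    split
    · simp
    · cases pvSM p cs <;> simp [pvConsHead]

theorem pvSM_congr (p q : Char → Bool) (h : ∀ c, p c = q c) (l : List Char) :
    pvSM p l = pvSM q l := by
  induction l with
  | nil => rfl
  | cons c cs ih => simp [pvSM, h, ih]

theorem splitOn_go_eq (d : Char) : ∀ (fuel : Nat) (l cur : List Char) (out : List (List Char)),
    l.length < fuel →
    PySem.Chars.splitOn.go [d] fuel l cur out = out.reverse ++ pvPrevHead cur.reverse (pvSM (· == d) l) := by
  intro fuel
  induction fuel with
  | zero => intro l cur out h; omega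
  | succ n ih =>
    intro l cur out h
    cases l with
    | nil =>
      simp [PySem.Chars.splitOn.go, pvSM, pvPrevHead]
    | cons c rest =>
      simp only [PySem.Chars.splitOn.go, List.isPrefixOf, Bool.and_true]
      by_cases hc : c = d
      · have : (d == c) = true := by simp [hc]
        simp only [this, if_pos]
        rw [show List.drop [d].length (c :: rest) = rest from rfl]
        rw [ih rest [] (cur.reverse :: out) (by simpa using Nat.lt_of_succ_lt_succ h)]
        simp [pvSM, hc, pvPrevHead]
        cases hsm : pvSM (· == d) rest with
        | nil => exact absurd hsm (pvSM_ne_nil _ _)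
        | cons h t => simp
      · have : (d == c) = false := by simp [Ne.symm hc]
        simp only [this, Bool.false_eq_true, if_false]
        rw [ih rest (c :: cur) out (by simpa using Nat.lt_of_succ_lt_succ h)]
        have hcd : (c == d) = false := by simp [hc]
        simp only [pvSM, hcd, Bool.false_eq_true, if_false]
        cases hsm : pvSM (· == d) rest with
        | nil => exact absurd hsm (pvSM_ne_nil _ _)
        | cons h t => simp [pvPrevHead, pvConsHead]

theorem splitOn_single (l : List Char) (d : Char) :
    PySem.Chars.splitOn l [d] = pvSM (· == d) l := by
  unfold PySem.Chars.splitOn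
  rw [splitOn_go_eq d (l.length + 1) l [] [] (by omega)]
  cases hsm : pvSM (· == d) l with
  | nil => exact absurd hsm (pvSM_ne_nil _ _)
  | cons h t => simp [pvPrevHead]

theorem consHead_append (c : Char) (A B : List (List Char)) (hA : A ≠ []) :
    pvConsHead c (A ++ B) = pvConsHead c A ++ B := by
  cases A with
  | nil => exact absurd rfl hA
  | cons h t => simp [pvConsHead]

theorem flatMap_sMp (d : Char) (p : Char → Bool) (l : List Char) :
    (pvSM p l).flatMap (fun w => pvSM (· == d) w) = pvSM (fun c => c == d || p c) l := by
  induction l with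
  | nil => simp [pvSM]
  | cons c cs ih =>
    by_cases hp : p c = true
    · simp only [pvSM, hp, if_pos, Bool.or_true, List.flatMap_cons]
      simpa using ih
    · have hp' : p c = false := by simpa using hp
      simp only [pvSM, hp', Bool.false_eq_true, if_false, Bool.or_false]
      cases hsm : pvSM p cs with
      | nil => exact absurd hsm (pvSM_ne_nil _ _)
      | cons h t =>
        rw [hsm] at ih
        by_cases hd : (c == d) = true
        · simp only [hd, if_pos, pvConsHead, List.flatMap_cons]
          have : pvSM (· == d) (c :: h) = [] :: pvSM (· == d) h := by simp [pvSM, hd]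
          rw [this]
          simpa using ih
        · have hd' : (c == d) = false := by simpa using hd
          simp only [hd', Bool.false_eq_true, if_false, pvConsHead, List.flatMap_cons]
          have h1 : pvSM (· == d) (c :: h) = pvConsHead c (pvSM (· == d) h) := by
            simp [pvSM, hd']
          rw [h1, ← ih, ← consHead_append c _ _ (pvSM_ne_nil _ _)]
          cases hX : pvSM (fun x => x == d) h ++ List.flatMap (fun w => pvSM (fun x => x == d) w) t <;>
            simp [pvConsHead, hX]

-- the word list A builds (after its three split passes), at the char level
theorem A_words (s : String) :
    ([" ", "_", "-"] : List String).foldl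
      (fun words char => words.foldl (fun new_words word => new_words ++ strSplitChar word char) []) [s]
    = (pvSM (fun c => c == '-' || (c == '_' || (c == ' ' || false))) s.toList).map String.ofList := by
  simp only [List.foldl_cons, List.foldl_nil]
  have step : ∀ (ws : List String) (d : String),
      ws.foldl (fun new_words word => new_words ++ strSplitChar word d) [] = ws.flatMap (fun w => strSplitChar w d) := by
    intro ws d
    simpa using PySem.List.foldl_append_eq_flatMap (fun w => strSplitChar w d) ws []
  rw [step, step]
  simp only [List.nil_append]
  have hsp : ∀ (L : List (List Char)) (d : Char) (ds : String), ds.toList = [d] →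
      (L.map String.ofList).flatMap (fun w => strSplitChar w ds)
        = (L.flatMap (fun w => pvSM (· == d) w)).map String.ofList := by
    intro L d ds hds
    simp only [List.flatMap_map, strSplitChar, hds]
    rw [List.map_flatMap]
    congr 1
    funext w
    simp [splitOn_single]
  have h1 : strSplitChar s " "
      = ((pvSM (fun c => c == ' ' || false) s.toList).map String.ofList) := by
    simp only [strSplitChar]
    rw [show (" " : String).toList = [' '] by rfl, splitOn_single]
    rw [pvSM_congr (· == ' ') (fun c => c == ' ' || false) (by simp) s.toList]
  rw [h1, hsp _ '_' "_" rfl, flatMap_sMp, hsp _ '-' "-" rfl, flatMap_sMp]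

-- B's scan, unrolled: the parts list it accumulates
theorem B_scan (l : List Char) : ∀ (parts : List String) (word : String),
    (l.foldl (fun (s : List String × String) ch =>
        if ch == ' ' || ch == '_' || ch == '-' then (s.1 ++ [pyCapitalize s.2], "")
        else (s.1, s.2.push ch)) (parts, word)).1
      ++ [pyCapitalize (l.foldl (fun (s : List String × String) ch =>
        if ch == ' ' || ch == '_' || ch == '-' then (s.1 ++ [pyCapitalize s.2], "")
        else (s.1, s.2.push ch)) (parts, word)).2]
    = parts ++ (pvPrevHead word.toList
        (pvSM (fun c => c == ' ' || c == '_' || c == '-') l)).map (fun w => pyCapitalize (String.ofList w)) := by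
  induction l with
  | nil =>
    intro parts word
    simp [pvSM, pvPrevHead, pyCapitalize]
  | cons c cs ih =>
    intro parts word
    by_cases hd : (c == ' ' || c == '_' || c == '-') = true
    · simp only [List.foldl_cons, hd, if_pos]
      rw [ih]
      simp only [pvSM, hd, if_pos]
      cases hsm : pvSM (fun c => c == ' ' || c == '_' || c == '-') cs with
      | nil => exact absurd hsm (pvSM_ne_nil _ _)
      | cons h t =>
        simp [pvPrevHead, pyCapitalize]
    · have hd' : (c == ' ' || c == '_' || c == '-') = false := by simpa using hd
      simp only [List.foldl_cons, hd', Bool.false_eq_true, if_false]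
      rw [ih]
      simp only [pvSM, hd', Bool.false_eq_true, if_false]
      cases hsm : pvSM (fun c => c == ' ' || c == '_' || c == '-') cs with
      | nil => exact absurd hsm (pvSM_ne_nil _ _)
      | cons h t =>
        simp [pvPrevHead, pvConsHead]

-- ===== VERDICT (by name: the statement is the Claim_ definition above) =====
theorem CapitalCase_spec : Claim_equal_CapitalCase := by
  intro s _
  unfold Spec_CapitalCase CapitalCase CapitalCase_alt
  simp only []
  rw [A_words s]
  rw [B_scan s.toList [] ""]
  congr 1
  rw [show ("" : String).toList = [] by rfl]
  cases hsm : pvSM (fun c => c == ' ' || c == '_' || c == '-') s.toList with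
  | nil => exact absurd hsm (pvSM_ne_nil _ _)
  | cons h t =>
    rw [pvSM_congr (fun c => c == '-' || (c == '_' || (c == ' ' || false)))
      (fun c => c == ' ' || c == '_' || c == '-') (by intro c; cases h1 : (c == ' ') <;> cases h2 : (c == '_') <;> cases h3 : (c == '-') <;> simp [h1, h2, h3]) s.toList, hsm]
    simp [pvPrevHead]
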